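-- pv_equiv track=rewrite | github.com/Kunze-Ritter/Manual2Vector | backend/optimizations/smart_chunking_optimization.py | _find_smart_break_point
-- ===== SOURCE A (Python) =====
-- def _find_smart_break_point(text: str, max_length: int) -> int:
--     """Find intelligent break point in text"""
--     if len(text) <= max_length:
--         return len(text)
--
--     # Look for sentence endings first
--     for i in range(max_length, max(0, max_length - 100), -1):
--         if text[i] in '.!?':
--             return i + 1
--
--     # Look for paragraph breaks
--     for i in range(max_length, max(0, max_length - 50), -1):
--         if text[i] == '\n' and text[i-1] == '\n':
--             return i
--
--     # Look for word boundaries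
--     for i in range(max_length, max(0, max_length - 30), -1):
--         if text[i] == ' ':
--             return i
--
--     return max_length
-- ===== SOURCE B (Python) =====
-- def _find_smart_break_point(text: str, max_length: int) -> int:
--     """One backward scan over the sentence window; paragraph/word candidates
--     are recorded on the fly instead of separate re-scans."""
--     n = len(text)
--     if n <= max_length:
--         return n
--     lo50 = max(0, max_length - 50)
--     lo30 = max(0, max_length - 30)
--     para = None
--     word = None
--     for i in range(max_length, max(0, max_length - 100), -1):
--         c = text[i]
--         if c in '.!?':
--             return i + 1
--         if para is None and i > lo50 and c == '\n' and text[i - 1] == '\n':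
--             para = i
--         if word is None and i > lo30 and c == ' ':
--             word = i
--     if para is not None:
--         return para
--     if word is not None:
--         return word
--     return max_length
-- ===== Notes on version B (the rewrite author's own statement) =====
-- stated objective: alternative
-- what changed: Replaces A's three separate backward scans (sentence, paragraph, word windows) by one backward scan over the widest window that returns on sentence endings immediately and records the first paragraph/word candidate inside their narrower windows on the fly.
import Mathlib
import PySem

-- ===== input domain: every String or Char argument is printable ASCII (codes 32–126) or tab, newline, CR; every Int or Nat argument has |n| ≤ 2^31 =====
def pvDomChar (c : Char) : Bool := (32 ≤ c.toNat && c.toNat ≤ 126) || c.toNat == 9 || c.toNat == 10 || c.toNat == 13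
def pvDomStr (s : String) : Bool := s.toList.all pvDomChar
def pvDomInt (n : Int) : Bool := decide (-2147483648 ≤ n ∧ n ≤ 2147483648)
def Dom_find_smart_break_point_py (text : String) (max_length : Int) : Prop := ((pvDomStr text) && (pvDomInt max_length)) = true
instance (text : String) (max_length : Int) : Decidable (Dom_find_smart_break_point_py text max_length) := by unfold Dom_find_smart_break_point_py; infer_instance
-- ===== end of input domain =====

-- B merges A's three backward scans into one backward pass with two recorded candidates (objective: alternative decomposition).
-- In every loop, 1 ≤ i ≤ max_length < len(text), so indexing never raises; pyGetD with a non-text default char is exact there.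

-- ===== PORT A =====
-- "for i in range(max_length, max(0, max_length-100), -1): if text[i] in '.!?': return i+1"
def pvScanSent (cs : List Char) : List Int → Option Int
  | [] => none
  | i :: rest =>
    let c := PySem.List.pyGetD cs i '\x00'
    if c = '.' ∨ c = '!' ∨ c = '?' then some (i + 1) else pvScanSent cs rest

-- "for i in range(max_length, max(0, max_length-50), -1): if text[i] == '\n' and text[i-1] == '\n': return i"
def pvScanPara (cs : List Char) : List Int → Option Int
  | [] => none
  | i :: rest =>
    if PySem.List.pyGetD cs i '\x00' = '\n' ∧ PySem.List.pyGetD cs (i - 1) '\x00' = '\n'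
    then some i else pvScanPara cs rest

-- "for i in range(max_length, max(0, max_length-30), -1): if text[i] == ' ': return i"
def pvScanWord (cs : List Char) : List Int → Option Int
  | [] => none
  | i :: rest =>
    if PySem.List.pyGetD cs i '\x00' = ' ' then some i else pvScanWord cs rest

def find_smart_break_point_py (text : String) (max_length : Int) : Int :=
  let cs := text.toList
  if PySem.Str.len text ≤ max_length then PySem.Str.len text
  else
    match pvScanSent cs (PySem.List.pyRange max_length (max 0 (max_length - 100)) (-1)) with
    | some r => r
    | none =>
      match pvScanPara cs (PySem.List.pyRange max_length (max 0 (max_length - 50)) (-1)) with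
      | some r => r
      | none =>
        match pvScanWord cs (PySem.List.pyRange max_length (max 0 (max_length - 30)) (-1)) with
        | some r => r
        | none => max_length

-- ===== PORT B =====
-- single backward pass (Source B's loop), carrying the para/word candidates
def pvMergedLoop (cs : List Char) (lo50 lo30 ml : Int) :
    List Int → Option Int → Option Int → Int
  | [], para, word =>
    match para with
    | some p => p
    | none => match word with
      | some w => w
      | none => ml
  | i :: rest, para, word =>
    let c := PySem.List.pyGetD cs i '\x00'
    if c = '.' ∨ c = '!' ∨ c = '?' then i + 1
    else
      pvMergedLoop cs lo50 lo30 ml rest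
        (if para = none ∧ lo50 < i ∧ c = '\n' ∧ PySem.List.pyGetD cs (i - 1) '\x00' = '\n'
         then some i else para)
        (if word = none ∧ lo30 < i ∧ c = ' ' then some i else word)

def find_smart_break_point_py_alt (text : String) (max_length : Int) : Int :=
  let cs := text.toList
  if PySem.Str.len text ≤ max_length then PySem.Str.len text
  else
    pvMergedLoop cs (max 0 (max_length - 50)) (max 0 (max_length - 30)) max_length
      (PySem.List.pyRange max_length (max 0 (max_length - 100)) (-1)) none none

-- ===== PRECONDITION & SPEC =====
def Spec_find_smart_break_point_py (text : String) (max_length : Int) (out : Int) : Prop := out = find_smart_break_point_py_alt text max_length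
instance (text : String) (max_length : Int) (out : Int) : Decidable (Spec_find_smart_break_point_py text max_length out) := by unfold Spec_find_smart_break_point_py; infer_instance

-- ===== CLAIM (what is proved, stated in full; the proofs are below) =====
def Claim_equal_find_smart_break_point_py : Prop := ∀ (text : String) (max_length : Int), Dom_find_smart_break_point_py text max_length → Spec_find_smart_break_point_py text max_length (find_smart_break_point_py text max_length)

-- ===== LEMMAS AND PROOFS =====

-- the narrower windows are the (· > lo)-filtered wide window
lemma pv_filter_pyRange_neg_one (n : Nat) :
    ∀ (a b lo : Int), (a - b).toNat = n → b ≤ lo →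
      (PySem.List.pyRange a b (-1)).filter (fun i => decide (lo < i)) =
        PySem.List.pyRange a lo (-1) := by
  induction n with
  | zero =>
    intro a b lo hn hble
    have hab : a ≤ b := by omega
    rw [PySem.List.pyRange_neg_one_eq_nil hab,
        PySem.List.pyRange_neg_one_eq_nil (by omega : a ≤ lo)]
    rfl
  | succ k ih =>
    intro a b lo hn hble
    have hba : b < a := by omega
    rw [PySem.List.pyRange_neg_one_cons hba]
    by_cases hlo : lo < a
    · rw [PySem.List.pyRange_neg_one_cons hlo]
      simp only [List.filter_cons, decide_eq_true_eq, hlo, if_true]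
      rw [ih (a - 1) b lo (by omega) hble]
    · have hla : a ≤ lo := by omega
      rw [PySem.List.pyRange_neg_one_eq_nil hla]
      simp only [List.filter_cons, decide_eq_true_eq, hlo, if_false]
      rw [ih (a - 1) b lo (by omega) hble,
          PySem.List.pyRange_neg_one_eq_nil (by omega : a - 1 ≤ lo)]

-- cascade of the three scan results (proof-side helper)
def pvCombine (s p w : Option Int) (ml : Int) : Int :=
  match s with
  | some r => r
  | none =>
    match p with
    | some r => r
    | none =>
      match w with
      | some r => r
      | none => ml

-- the merged pass computes A's three-scan cascade
lemma pv_merged_eq (cs : List Char) (lo50 lo30 ml : Int) :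
    ∀ (L : List Int) (para word : Option Int),
      pvMergedLoop cs lo50 lo30 ml L para word =
        pvCombine (pvScanSent cs L)
          (para.or (pvScanPara cs (L.filter (fun i => decide (lo50 < i)))))
          (word.or (pvScanWord cs (L.filter (fun i => decide (lo30 < i))))) ml := by
  intro L
  induction L with
  | nil =>
    intro para word
    cases para <;> cases word <;> rfl
  | cons i rest ih =>
    intro para word
    by_cases hs : PySem.List.pyGetD cs i '\x00' = '.' ∨ PySem.List.pyGetD cs i '\x00' = '!' ∨
        PySem.List.pyGetD cs i '\x00' = '?'
    · simp [pvMergedLoop, pvScanSent, hs, pvCombine]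
    · have h1 : pvScanSent cs (i :: rest) = pvScanSent cs rest := by
        simp [pvScanSent, hs]
      have hp : (if para = none ∧ lo50 < i ∧ PySem.List.pyGetD cs i '\x00' = '\n' ∧
            PySem.List.pyGetD cs (i - 1) '\x00' = '\n' then some i else para).or
            (pvScanPara cs (rest.filter (fun j => decide (lo50 < j)))) =
          para.or (pvScanPara cs ((i :: rest).filter (fun j => decide (lo50 < j)))) := by
        cases para with
        | some p => simp
        | none =>
          simp only [List.filter_cons]
          by_cases h50 : lo50 < i
          · by_cases hc : PySem.List.pyGetD cs i '\x00' = '\n' ∧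
                PySem.List.pyGetD cs (i - 1) '\x00' = '\n'
            · simp [h50, hc, pvScanPara]
            · simp [h50, hc, pvScanPara]
          · simp [h50]
      have hw : (if word = none ∧ lo30 < i ∧ PySem.List.pyGetD cs i '\x00' = ' '
            then some i else word).or
            (pvScanWord cs (rest.filter (fun j => decide (lo30 < j)))) =
          word.or (pvScanWord cs ((i :: rest).filter (fun j => decide (lo30 < j)))) := by
        cases word with
        | some w => simp
        | none =>
          simp only [List.filter_cons]
          by_cases h30 : lo30 < i
          · by_cases hc : PySem.List.pyGetD cs i '\x00' = ' '
            · simp [h30, hc, pvScanWord]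
            · simp [h30, hc, pvScanWord]
          · simp [h30]
      show pvMergedLoop cs lo50 lo30 ml (i :: rest) para word = _
      simp only [pvMergedLoop, hs, if_false]
      rw [ih, h1, hp, hw]

-- ===== VERDICT (by name: the statement is the Claim_ definition above) =====
theorem find_smart_break_point_py_spec : Claim_equal_find_smart_break_point_py := by
  intro text ml _
  unfold Spec_find_smart_break_point_py find_smart_break_point_py find_smart_break_point_py_alt
  by_cases hg : PySem.Str.len text ≤ ml
  · rw [if_pos hg, if_pos hg]
  · rw [if_neg hg, if_neg hg]
    rw [pv_merged_eq]
    rw [pv_filter_pyRange_neg_one (ml - max 0 (ml - 100)).toNat ml (max 0 (ml - 100))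
          (max 0 (ml - 50)) rfl (by omega),
        pv_filter_pyRange_neg_one (ml - max 0 (ml - 100)).toNat ml (max 0 (ml - 100))
          (max 0 (ml - 30)) rfl (by omega)]
    rfl
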